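-- pv_equiv track=rewrite | github.com/Holding-Light/cogitate-constraint-reanalysis | scripts/utils.py | get_electrode_roi
-- ===== SOURCE A (Python) =====
-- def get_electrode_roi(ch_name, montage_labels, rois):
--     """
--     Map an electrode to a region of interest based on atlas labels.
--
--     Parameters
--     ----------
--     ch_name : str
--         Channel name.
--     montage_labels : dict
--         Output of mne.get_montage_volume_labels().
--     rois : dict
--         ROI definitions from config (keys: roi_name, values: list of labels).
--
--     Returns
--     -------
--     roi_name : str or None
--         Name of the ROI, or None if not in any ROI.
--     """
--     if ch_name not in montage_labels:
--         return None
--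
--     labels = montage_labels[ch_name]
--     if not labels:
--         return None
--
--     # Check each ROI
--     for roi_name, roi_labels in rois.items():
--         for label in labels:
--             # Desikan labels may have hemisphere prefix — strip it
--             clean_label = label.replace('ctx-lh-', '').replace('ctx-rh-', '')
--             clean_label = clean_label.replace('Left-', '').replace('Right-', '')
--             if clean_label.lower() in [r.lower() for r in roi_labels]:
--                 return roi_name
--
--     return None
-- ===== SOURCE B (Python) =====
-- def get_electrode_roi(ch_name, montage_labels, rois):
--     if ch_name not in montage_labels:
--         return None
--     labels = montage_labels[ch_name]
--     if not labels:
--         return None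
--     # reverse index: lowercased atlas label -> (rank, roi_name) of the FIRST ROI claiming it
--     index = {}
--     for rank, (roi_name, roi_labels) in enumerate(rois.items()):
--         for r in roi_labels:
--             index.setdefault(r.lower(), (rank, roi_name))
--     best = None
--     for label in labels:
--         clean = label.replace('ctx-lh-', '').replace('ctx-rh-', '')
--         clean = clean.replace('Left-', '').replace('Right-', '')
--         hit = index.get(clean.lower())
--         if hit is not None and (best is None or hit[0] < best[0]):
--             best = hit
--     return best[1] if best is not None else None
-- ===== Notes on version B (the rewrite author's own statement) =====
-- stated objective: alternative
-- what changed: Replaces A's nested scan (for each ROI, for each electrode label, re-lowercasing every ROI label list) by a reverse index dict built once from (lowered ROI label -> (rank, roi_name), first ROI wins via setdefault) followed by a single min-rank pass over the cleaned electrode labels.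
import Mathlib
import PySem

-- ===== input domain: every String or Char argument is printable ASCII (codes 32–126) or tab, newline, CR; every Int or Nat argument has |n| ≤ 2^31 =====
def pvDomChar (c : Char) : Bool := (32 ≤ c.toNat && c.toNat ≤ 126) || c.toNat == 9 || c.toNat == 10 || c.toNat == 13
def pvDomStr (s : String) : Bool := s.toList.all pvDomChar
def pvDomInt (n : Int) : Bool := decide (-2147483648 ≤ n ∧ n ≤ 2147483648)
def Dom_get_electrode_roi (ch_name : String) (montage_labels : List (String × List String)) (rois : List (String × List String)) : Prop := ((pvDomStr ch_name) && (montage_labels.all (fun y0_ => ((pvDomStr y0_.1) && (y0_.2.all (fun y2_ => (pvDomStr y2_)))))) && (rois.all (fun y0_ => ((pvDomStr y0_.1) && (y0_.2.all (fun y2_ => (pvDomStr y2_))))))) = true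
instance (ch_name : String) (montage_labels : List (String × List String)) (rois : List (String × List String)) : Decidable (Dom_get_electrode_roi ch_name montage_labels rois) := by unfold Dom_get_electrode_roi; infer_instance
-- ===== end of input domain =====

-- B replaces A's per-ROI nested scanning by a reverse index (lowered label -> (rank, roi_name),
-- first ROI wins) built once, then a single min-rank pass over the electrode's cleaned labels;
-- objective: alternative (data-structure change), same observable behaviour.

-- ===== PORT A =====
-- shared guard code of both Pythons: first-match dict lookup (assoc-list convention)
def pvLookup (m : List (String × List String)) (k : String) : Option (List String) :=
  (m.find? (fun p => p.1 == k)).map (·.2)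

-- shared cleaning chain, verbatim in both Pythons: strip prefixes, lowercase
def pvCleanLow (label : String) : String :=
  PySem.Str.lower
    (PySem.Str.replace (PySem.Str.replace (PySem.Str.replace (PySem.Str.replace
      label "ctx-lh-" "") "ctx-rh-" "") "Left-" "") "Right-" "")

-- A's outer for-loop over rois.items() with inner for-loop over labels and early return
def pvScanA (labels : List String) : List (String × List String) → Option String
  | [] => none
  | (roi_name, roi_labels) :: rest =>
    if labels.any (fun label => (roi_labels.map PySem.Str.lower).contains (pvCleanLow label))
    then some roi_name
    else pvScanA labels rest

def get_electrode_roi (ch_name : String) (montage_labels : List (String × List String)) (rois : List (String × List String)) : Option String :=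
  match pvLookup montage_labels ch_name with
  | none => none
  | some labels => if labels.isEmpty then none else pvScanA labels rois

-- ===== PORT B =====
-- the reverse index: for rank,(roi_name,roi_labels) in enumerate(rois.items()): for r in roi_labels: index.setdefault(r.lower(),(rank,roi_name))
def pvIndexB (rois : List (String × List String)) : PySem.Dict String (Int × String) :=
  (PySem.List.enumerate rois 0).foldl
    (fun d p => p.2.2.foldl (fun d r => d.setdefault (PySem.Str.lower r) (p.1, p.2.1)) d)
    PySem.Dict.empty

-- the single pass keeping the hit of smallest rank (first ROI in dict order)
def pvBestB (index : PySem.Dict String (Int × String)) (labels : List String) : Option (Int × String) :=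
  labels.foldl (fun best label =>
    match index.get? (pvCleanLow label) with
    | none => best
    | some hit =>
      match best with
      | none => some hit
      | some b => if hit.1 < b.1 then some hit else best) none

def get_electrode_roi_alt (ch_name : String) (montage_labels : List (String × List String)) (rois : List (String × List String)) : Option String :=
  match pvLookup montage_labels ch_name with
  | none => none
  | some labels =>
    if labels.isEmpty then none
    else (pvBestB (pvIndexB rois) labels).map (·.2)

-- ===== PRECONDITION & SPEC =====
def Spec_get_electrode_roi (ch_name : String) (montage_labels : List (String × List String)) (rois : List (String × List String)) (out : Option String) : Prop := out = get_electrode_roi_alt ch_name montage_labels rois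
instance (ch_name : String) (montage_labels : List (String × List String)) (rois : List (String × List String)) (out : Option String) : Decidable (Spec_get_electrode_roi ch_name montage_labels rois out) := by unfold Spec_get_electrode_roi; infer_instance

-- ===== CLAIM (what is proved, stated in full; the proofs are below) =====
def Claim_equal_get_electrode_roi : Prop := ∀ (ch_name : String) (montage_labels : List (String × List String)) (rois : List (String × List String)), Dom_get_electrode_roi ch_name montage_labels rois → Spec_get_electrode_roi ch_name montage_labels rois (get_electrode_roi ch_name montage_labels rois)

-- ===== LEMMAS AND PROOFS =====

-- spec of the reverse index: the first ROI (from rank k on) whose lowered labels contain l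
def pvFirstRoi (k : Int) (l : String) : List (String × List String) → Option (Int × String)
  | [] => none
  | (n, ls) :: rest =>
    if (ls.map PySem.Str.lower).contains l then some (k, n) else pvFirstRoi (k + 1) l rest

-- min-by-rank fold over an explicit hit list
def pvStep (best : Option (Int × String)) (hit : Int × String) : Option (Int × String) :=
  match best with
  | none => some hit
  | some b => if hit.1 < b.1 then some hit else best

def pvMin (hits : List (Int × String)) : Option (Int × String) := hits.foldl pvStep none

theorem pvInner_get? (ls : List String) (d : PySem.Dict String (Int × String)) (k : Int) (n : String) (l : String) :
    (ls.foldl (fun d r => d.setdefault (PySem.Str.lower r) (k, n)) d).get? l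
      = (d.get? l).or (if (ls.map PySem.Str.lower).contains l then some (k, n) else none) := by
  induction ls generalizing d with
  | nil => simp
  | cons r rs ih =>
    simp only [List.foldl_cons, List.map_cons, List.contains_cons]
    rw [ih]
    by_cases hrl : l = PySem.Str.lower r
    · subst hrl
      rw [PySem.Dict.get?_setdefault_self]
      cases hd : d.get? (PySem.Str.lower r) <;> simp
    · rw [PySem.Dict.get?_setdefault_of_ne d _ hrl]
      have hbeq : ((l == PySem.Str.lower r) : Bool) = false := by simp [hrl]
      simp only [hbeq, Bool.false_or]

theorem pvIndexB_get? (rois : List (String × List String)) (k : Int) (l : String)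
    (d : PySem.Dict String (Int × String)) :
    ((PySem.List.enumerate rois k).foldl
      (fun d p => p.2.2.foldl (fun d r => d.setdefault (PySem.Str.lower r) (p.1, p.2.1)) d) d).get? l
      = (d.get? l).or (pvFirstRoi k l rois) := by
  induction rois generalizing d k with
  | nil => simp [pvFirstRoi, PySem.List.enumerate_nil]
  | cons p rest ih =>
    obtain ⟨n, ls⟩ := p
    rw [PySem.List.enumerate_cons, List.foldl_cons, ih, pvInner_get?, pvFirstRoi, Option.or_assoc]
    congr 1
    split <;> simp

theorem pvFirstRoi_rank (rois : List (String × List String)) (k : Int) (l : String) (h : Int × String)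
    (hh : pvFirstRoi k l rois = some h) : k ≤ h.1 := by
  induction rois generalizing k with
  | nil => simp [pvFirstRoi] at hh
  | cons p rest ih =>
    obtain ⟨n, ls⟩ := p
    rw [pvFirstRoi] at hh
    split at hh
    · cases hh; simp
    · have := ih (k + 1) hh; omega

theorem pvMin_go (hits : List (Int × String)) (b : Int × String) :
    ∃ h, hits.foldl pvStep (some b) = some h ∧ (h = b ∨ h ∈ hits) ∧ h.1 ≤ b.1 ∧ ∀ h' ∈ hits, h.1 ≤ h'.1 := by
  induction hits generalizing b with
  | nil => exact ⟨b, rfl, Or.inl rfl, le_refl _, by simp⟩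
  | cons h0 rest ih =>
    simp only [List.foldl_cons, pvStep]
    by_cases hlt : h0.1 < b.1
    · obtain ⟨h, heq, hmem, hle, hall⟩ := ih h0
      refine ⟨h, by simpa [hlt] using heq, ?_, by omega, ?_⟩
      · rcases hmem with rfl | hm
        · exact Or.inr (List.mem_cons_self)
        · exact Or.inr (List.mem_cons_of_mem _ hm)
      · intro h' hh'
        rcases List.mem_cons.mp hh' with rfl | hm
        · exact hle
        · exact hall h' hm
    · obtain ⟨h, heq, hmem, hle, hall⟩ := ih b
      refine ⟨h, by simpa [hlt] using heq, ?_, hle, ?_⟩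
      · rcases hmem with rfl | hm
        · exact Or.inl rfl
        · exact Or.inr (List.mem_cons_of_mem _ hm)
      · intro h' hh'
        rcases List.mem_cons.mp hh' with rfl | hm
        · omega
        · exact hall h' hm

theorem pvMin_spec (hits : List (Int × String)) (h0 : Int × String) (hmem : h0 ∈ hits) :
    ∃ h, pvMin hits = some h ∧ h ∈ hits ∧ h.1 ≤ h0.1 := by
  cases hits with
  | nil => simp at hmem
  | cons a rest =>
    obtain ⟨h, heq, hm, hle, hall⟩ := pvMin_go rest a
    refine ⟨h, by simpa [pvMin, pvStep] using heq, ?_, ?_⟩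
    · rcases hm with rfl | hm
      · exact List.mem_cons_self
      · exact List.mem_cons_of_mem _ hm
    · rcases List.mem_cons.mp hmem with rfl | hm
      · exact hle
      · exact hall h0 hm

theorem pvBestB_eq_pvMin (index : PySem.Dict String (Int × String)) (labels : List String) :
    pvBestB index labels = pvMin (labels.filterMap (fun label => index.get? (pvCleanLow label))) := by
  unfold pvBestB pvMin
  generalize (none : Option (Int × String)) = init
  induction labels generalizing init with
  | nil => rfl
  | cons lab rest ih =>
    simp only [List.filterMap_cons]
    cases hg : index.get? (pvCleanLow lab) with
    | none => simp only [List.foldl_cons, hg]; exact ih init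
    | some hit => simp only [List.foldl_cons, hg, pvStep]; exact ih _

theorem pvMain (labels : List String) (rois : List (String × List String)) (k : Int) :
    pvScanA labels rois
      = (pvMin (labels.filterMap (fun label => pvFirstRoi k (pvCleanLow label) rois))).map (·.2) := by
  induction rois generalizing k with
  | nil => simp [pvScanA, pvFirstRoi, pvMin]
  | cons p rest ih =>
    obtain ⟨n, ls⟩ := p
    rw [pvScanA]
    by_cases hA : labels.any (fun label => (ls.map PySem.Str.lower).contains (pvCleanLow label)) = true
    · simp only [hA, if_true]
      obtain ⟨lab, hlabmem, hlabP⟩ := List.any_eq_true.mp hA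
      have hwit : (k, n) ∈ labels.filterMap (fun label => pvFirstRoi k (pvCleanLow label) ((n, ls) :: rest)) := by
        refine List.mem_filterMap.mpr ⟨lab, hlabmem, ?_⟩
        rw [pvFirstRoi, if_pos hlabP]
      obtain ⟨h, hmin, hmem, hle⟩ := pvMin_spec _ _ hwit
      have hhk : h = (k, n) := by
        obtain ⟨lab', _, hfr⟩ := List.mem_filterMap.mp hmem
        rw [pvFirstRoi] at hfr
        split at hfr
        · exact (Option.some_inj.mp hfr).symm
        · have h1 := pvFirstRoi_rank _ _ _ _ hfr
          have h2 : h.1 ≤ k := hle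
          omega
      rw [hmin, hhk, Option.map_some]
    · have hcong : List.filterMap (fun label => pvFirstRoi k (pvCleanLow label) ((n, ls) :: rest)) labels
          = List.filterMap (fun label => pvFirstRoi (k + 1) (pvCleanLow label) rest) labels := by
        apply List.filterMap_congr
        intro lab hlab
        have hP : (ls.map PySem.Str.lower).contains (pvCleanLow lab) = false := by
          by_contra hc
          exact hA (List.any_eq_true.mpr ⟨lab, hlab, by simpa using hc⟩)
        rw [pvFirstRoi]
        simp only [hP, Bool.false_eq_true, if_false]
      rw [if_neg hA, hcong]
      exact ih (k + 1)

-- ===== VERDICT (by name: the statement is the Claim_ definition above) =====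
theorem get_electrode_roi_spec : Claim_equal_get_electrode_roi := by
  intro ch m rois _
  unfold Spec_get_electrode_roi get_electrode_roi get_electrode_roi_alt
  cases hl : pvLookup m ch with
  | none => rfl
  | some labels =>
    simp only
    by_cases he : labels.isEmpty
    · simp [he]
    · simp only [he]
      rw [pvBestB_eq_pvMin]
      have : ∀ label, (pvIndexB rois).get? (pvCleanLow label) = pvFirstRoi 0 (pvCleanLow label) rois := by
        intro label
        have := pvIndexB_get? rois 0 (pvCleanLow label) PySem.Dict.empty
        simpa [pvIndexB, PySem.Dict.get?_empty] using this
      simp only [this]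
      exact pvMain labels rois 0
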